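-- pv_equiv track=rewrite | github.com/tr3buchet/nova | nova/cells/utils.py | path_without_hosts
-- ===== SOURCE A (Python) =====
-- PATH_CELL_SEP = '!'
--
-- PATH_CELL_HOST_SEP = '@'
--
-- def path_without_hosts(routing_path):
--     """Return a path without host information."""
--     def strip_host(path_part):
--         if PATH_CELL_HOST_SEP in path_part:
--             return path_part.split(PATH_CELL_HOST_SEP, 1)[0]
--         else:
--             return path_part
--     return PATH_CELL_SEP.join([strip_host(path_part)
--             for path_part in routing_path.split(PATH_CELL_SEP)])
-- ===== SOURCE B (Python) =====
-- import re
--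
-- PATH_CELL_SEP = '!'
--
-- PATH_CELL_HOST_SEP = '@'
--
-- _HOST_RE = re.compile(re.escape(PATH_CELL_HOST_SEP) +
--                       '[^' + re.escape(PATH_CELL_SEP) + ']*')
--
--
-- def path_without_hosts(routing_path):
--     """Return a path without host information."""
--     return _HOST_RE.sub('', routing_path)
-- ===== Notes on version B (the rewrite author's own statement) =====
-- stated objective: idiomatic
-- what changed: Replaces the split-on-separator / strip-each-segment / rejoin pipeline with a single regular-expression substitution that deletes each host marker together with the host characters following it, in one pass with no splitting or rejoining.
import Mathlib
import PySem

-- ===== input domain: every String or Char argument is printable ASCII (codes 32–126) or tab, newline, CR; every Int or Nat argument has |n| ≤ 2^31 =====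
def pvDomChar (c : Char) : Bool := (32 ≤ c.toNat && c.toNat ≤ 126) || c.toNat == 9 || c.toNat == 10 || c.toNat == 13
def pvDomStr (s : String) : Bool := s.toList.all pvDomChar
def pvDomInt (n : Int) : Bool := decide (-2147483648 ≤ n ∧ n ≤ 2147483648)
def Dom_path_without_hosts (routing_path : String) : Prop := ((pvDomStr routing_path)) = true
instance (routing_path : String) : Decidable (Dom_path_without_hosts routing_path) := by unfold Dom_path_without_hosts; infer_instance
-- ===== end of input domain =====

-- B replaces the split/strip/join pipeline by a single regex substitution that deletes each host marker and the host characters after it: one pass, no splitting or rejoining (idiomatic).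


-- ===== PORT A =====
-- strip_host(path_part): part.split('@', 1)[0] if '@' in part else part
-- (split always returns a non-empty list, so the Python [0] never raises; the [] match arm is unreachable)
def stripHost (part : List Char) : List Char :=
  if PySem.Chars.isIn ['@'] part then
    match PySem.Chars.splitOnMax part ['@'] 1 with
    | x :: _ => x
    | [] => []
  else part

def path_without_hosts (routing_path : String) : String :=
  String.mk (PySem.Chars.join ['!']
    ((PySem.Chars.splitOn routing_path.toList ['!']).map stripHost))

-- ===== PORT B =====
-- hand port of re.sub('@[^!]*', '', s) (PySem has no regex): scan left to right; at each
-- position where the pattern matches — an '@' followed by the maximal run of non-'!'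
-- characters — drop the match and continue after it; otherwise copy the character. Exact:
-- this is precisely re.sub's leftmost, non-overlapping, greedy replacement of '@[^!]*'.
def reSub : List Char → List Char
  | [] => []
  | c :: rest =>
    if c = '@' then reSub (rest.dropWhile (fun d => d ≠ '!'))
    else c :: reSub rest
termination_by l => l.length
decreasing_by
  · simpa using Nat.lt_succ_of_le (rest.length_dropWhile_le _)
  · simp

def path_without_hosts_alt (routing_path : String) : String :=
  String.mk (reSub routing_path.toList)

-- ===== PRECONDITION & SPEC =====
def Spec_path_without_hosts (routing_path : String) (out : String) : Prop := out = path_without_hosts_alt routing_path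
instance (routing_path : String) (out : String) : Decidable (Spec_path_without_hosts routing_path out) := by unfold Spec_path_without_hosts; infer_instance

-- ===== CLAIM (what is proved, stated in full; the proofs are below) =====
def Claim_equal_path_without_hosts : Prop := ∀ (routing_path : String), Dom_path_without_hosts routing_path → Spec_path_without_hosts routing_path (path_without_hosts routing_path)

-- ===== LEMMAS AND PROOFS =====

-- per-segment strip: takeWhile of the non-'@' prefix
def tw (p : List Char) : List Char := p.takeWhile (fun d => d ≠ '@')

-- pure (fuel-free) form of splitOn on the single-char separator '!'
def segs : List Char → List (List Char)
  | [] => [[]]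
  | c :: rest =>
    if c = '!' then [] :: segs rest
    else (c :: (segs rest).headD []) :: (segs rest).tail

theorem segs_ne_nil (l : List Char) : segs l ≠ [] := by
  cases l with
  | nil => simp [segs]
  | cons c rest => simp only [segs]; split <;> simp

theorem segs_head_tail (l : List Char) : segs l = (segs l).headD [] :: (segs l).tail := by
  cases h : segs l with
  | nil => exact absurd h (segs_ne_nil l)
  | cons a t => simp

theorem segs_no (l : List Char) (h : '!' ∉ l) : segs l = [l] := by
  induction l with
  | nil => simp [segs]
  | cons c rest ih =>
    simp only [List.mem_cons, not_or] at h
    have hc : ¬ c = '!' := fun hx => h.1 hx.symm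
    simp [segs, hc, ih h.2]

theorem segs_yes (l r : List Char) (h : l.dropWhile (fun d => d ≠ '!') = '!' :: r) :
    segs l = l.takeWhile (fun d => d ≠ '!') :: segs r := by
  induction l with
  | nil => simp at h
  | cons c rest ih =>
    by_cases hc : c = '!'
    · subst hc
      simp only [List.dropWhile_cons, decide_not] at h
      simp at h
      subst h
      simp [segs, List.takeWhile_cons]
    · simp only [List.dropWhile_cons] at h
      rw [if_pos (by simp [hc])] at h
      simp [segs, hc, ih h, List.takeWhile_cons]

theorem go_segs (l : List Char) : ∀ (fuel : Nat) (cur : List Char) (acc : List (List Char)),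
    l.length ≤ fuel →
    PySem.Chars.splitOn.go ['!'] fuel l cur acc
      = acc.reverse ++ (cur.reverse ++ (segs l).headD []) :: (segs l).tail := by
  induction l with
  | nil =>
    intro fuel cur acc _
    cases fuel <;> simp [PySem.Chars.splitOn.go, segs]
  | cons c rest ih =>
    intro fuel cur acc hlen
    cases fuel with
    | zero => simp at hlen
    | succ f =>
      by_cases hc : c = '!'
      · subst hc
        rw [PySem.Chars.splitOn.go]
        rw [if_pos (by simp [List.isPrefixOf])]
        have hdrop : List.drop ['!'].length ('!' :: rest) = rest := rfl
        rw [hdrop]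
        simp only [List.length_cons] at hlen
        rw [ih f [] (cur.reverse :: acc) (by omega)]
        rw [segs_head_tail rest]
        simp [segs]
        simpa using (segs_head_tail rest).symm
      · rw [PySem.Chars.splitOn.go]
        rw [if_neg (by simp [List.isPrefixOf]; exact fun hx => hc hx.symm)]
        simp only [List.length_cons] at hlen
        rw [ih f (c :: cur) acc (by omega)]
        simp [segs, hc]

theorem goMax0 (fuel : Nat) (l cur : List Char) (acc : List (List Char)) :
    PySem.Chars.splitOnMax.go ['@'] fuel 0 l cur acc = ((cur.reverse ++ l) :: acc).reverse := by
  cases fuel <;> cases l <;> simp [PySem.Chars.splitOnMax.go]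

theorem goMax1 (l : List Char) : ∀ (fuel : Nat) (cur : List Char) (acc : List (List Char)),
    l.length ≤ fuel →
    ∃ rest, PySem.Chars.splitOnMax.go ['@'] fuel 1 l cur acc
      = acc.reverse ++ (cur.reverse ++ l.takeWhile (fun d => d ≠ '@')) :: rest := by
  induction l with
  | nil =>
    intro fuel cur acc _
    exact ⟨[], by cases fuel <;> simp [PySem.Chars.splitOnMax.go]⟩
  | cons c rest ih =>
    intro fuel cur acc hlen
    cases fuel with
    | zero => simp at hlen
    | succ f =>
      by_cases hc : c = '@'
      · subst hc
        refine ⟨[rest], ?_⟩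
        rw [PySem.Chars.splitOnMax.go]
        rw [if_neg (by simp), if_pos (by simp [List.isPrefixOf])]
        simp [goMax0, List.takeWhile_cons]
      · simp only [List.length_cons] at hlen
        obtain ⟨r, hr⟩ := ih f (c :: cur) acc (by omega)
        refine ⟨r, ?_⟩
        rw [PySem.Chars.splitOnMax.go]
        rw [if_neg (by simp), if_neg (by simp [List.isPrefixOf]; exact fun hx => hc hx.symm)]
        rw [hr]
        simp [hc]

theorem stripHost_eq (part : List Char) : stripHost part = tw part := by
  unfold stripHost tw
  split
  · obtain ⟨rest, h⟩ := goMax1 part (part.length + 1) [] [] (by omega)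
    simp only [PySem.Chars.splitOnMax]
    rw [if_neg (by norm_num)]
    simp only [Int.toNat_one]
    rw [h]
    simp
  · rename_i hin
    have hmem : '@' ∉ part := by
      intro hm
      apply hin
      rw [PySem.Chars.isIn_iff_infix]
      obtain ⟨s, t, hst⟩ := List.append_of_mem hm
      exact ⟨s, t, by simp [hst]⟩
    rw [List.takeWhile_eq_self_iff.mpr]
    intro a ha
    simp
    intro h
    exact hmem (h ▸ ha)

theorem join_cons_head (c : Char) (x : List Char) (t : List (List Char)) :
    PySem.Chars.join ['!'] ((c :: x) :: t) = c :: PySem.Chars.join ['!'] (x :: t) := by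
  cases t with
  | nil => simp [PySem.Chars.join_singleton]
  | cons b t' => rw [PySem.Chars.join_cons_cons, PySem.Chars.join_cons_cons]; simp

theorem main_eq (l : List Char) :
    PySem.Chars.join ['!'] ((segs l).map tw) = reSub l := by
  have key : ∀ (n : Nat) (l : List Char), l.length ≤ n →
      PySem.Chars.join ['!'] ((segs l).map tw) = reSub l := by
    intro n
    induction n with
    | zero =>
      intro l hl
      have hnil : l = [] := by cases l <;> simp_all
      subst hnil
      simp [segs, reSub, tw, PySem.Chars.join_singleton]
    | succ n ihn =>
      intro l hl
      cases l with
      | nil => simp [segs, reSub, tw, PySem.Chars.join_singleton]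
      | cons c rest =>
        simp only [List.length_cons] at hl
        by_cases hc : c = '!'
        · subst hc
          rw [show segs ('!' :: rest) = [] :: segs rest from by simp [segs]]
          rw [segs_head_tail rest, List.map_cons, List.map_cons, PySem.Chars.join_cons_cons,
            ← List.map_cons, ← segs_head_tail rest]
          rw [ihn rest (by omega)]
          simp [tw, reSub]
        · by_cases ha : c = '@'
          · subst ha
            rw [show segs ('@' :: rest)
                  = ('@' :: (segs rest).headD []) :: (segs rest).tail from by simp [segs]]
            rw [List.map_cons]
            rw [show tw ('@' :: (segs rest).headD []) = [] from by simp [tw]]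
            rw [show reSub ('@' :: rest) = reSub (rest.dropWhile (fun d => d ≠ '!')) from by
              simp [reSub]]
            cases hdrop : rest.dropWhile (fun d => d ≠ '!') with
            | nil =>
              have hmem : '!' ∉ rest := by
                intro hm
                have := List.dropWhile_eq_nil_iff.mp hdrop _ hm
                simp at this
              rw [segs_no rest hmem]
              simp [PySem.Chars.join_singleton, reSub]
            | cons d r =>
              have hd : d = '!' := by
                have hne : rest.dropWhile (fun d => d ≠ '!') ≠ [] := by rw [hdrop]; simp
                have h2 := List.head_dropWhile_not _ hne
                have hdrop' := hdrop
                simp only [decide_not] at hdrop'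
                simp [hdrop'] at h2
                exact h2
              subst hd
              rw [segs_yes rest r hdrop]
              simp only [List.tail_cons]
              rw [segs_head_tail r, List.map_cons, PySem.Chars.join_cons_cons,
                ← List.map_cons, ← segs_head_tail r]
              have hrlen : r.length ≤ n := by
                have h1 := rest.length_dropWhile_le (fun d => d ≠ '!')
                rw [hdrop] at h1
                simp only [List.length_cons] at h1
                omega
              rw [ihn r hrlen]
              rw [show reSub ('!' :: r) = '!' :: reSub r from by simp [reSub]]
              simp
          · rw [show segs (c :: rest)
                  = (c :: (segs rest).headD []) :: (segs rest).tail from by simp [segs, hc]]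
            rw [List.map_cons]
            rw [show tw (c :: (segs rest).headD []) = c :: tw ((segs rest).headD []) from by
              simp [tw, ha]]
            rw [join_cons_head]
            rw [show tw ((segs rest).headD []) :: List.map tw (segs rest).tail
                  = (segs rest).map tw by
              rw [segs_head_tail rest, List.map_cons, ← segs_head_tail rest]]
            rw [ihn rest (by omega)]
            rw [show reSub (c :: rest) = c :: reSub rest from by simp [reSub, ha]]
  exact key l.length l le_rfl

-- ===== VERDICT (by name: the statement is the Claim_ definition above) =====
theorem path_without_hosts_spec : Claim_equal_path_without_hosts := by
  intro s _
  unfold Spec_path_without_hosts path_without_hosts path_without_hosts_alt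
  congr 1
  rw [PySem.Chars.splitOn]
  rw [go_segs s.toList (s.toList.length + 1) [] [] (by omega)]
  simp only [List.reverse_nil, List.nil_append]
  rw [← segs_head_tail s.toList]
  rw [List.map_congr_left (fun p _ => stripHost_eq p)]
  exact main_eq s.toList
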